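-- pv_equiv track=rewrite | github.com/gabriel-frattini/aoc | 2023/day1/solve.py | solve
-- ===== SOURCE A (Python) =====
-- WORD_NUMBERS = {
--     "one": 1,
--     "two": 2,
--     "three": 3,
--     "four": 4,
--     "five": 5,
--     "six": 6,
--     "seven": 7,
--     "eight": 8,
--     "nine": 9,
-- }
--
-- def find_num(i, j) -> int | None:
--     return next((val for (num, val) in WORD_NUMBERS.items() if i[j:].find(num) == 0), None)
--
-- def solve(data):
--     sum_ = 0
--     for i in data.split("\n"):
--         first = None
--         last = None
--         for j in range(0, len(i)):
--             try:
--                 num = int(i[j])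
--             except ValueError:
--                 num = find_num(i, j)
--
--             if num is None:
--                 continue
--
--             if first is None:
--                 first = num
--
--             last = num
--
--         if first is None or last is None:
--             continue
--
--         sum_ += int(f"{first}{last}")
--
--     return sum_
-- ===== SOURCE B (Python) =====
-- WORDS = ["one", "two", "three", "four", "five", "six", "seven", "eight", "nine"]
--
--
-- def _token(line, j):
--     c = line[j]
--     if "0" <= c <= "9":
--         return ord(c) - ord("0")
--     for k, w in enumerate(WORDS):
--         if line.startswith(w, j):
--             return k + 1
--     return None
--
--
-- def solve(data):
--     total = 0
--     for line in data.split("\n"):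
--         first = None
--         for j in range(len(line)):
--             t = _token(line, j)
--             if t is not None:
--                 first = t
--                 break
--         if first is None:
--             continue
--         last = None
--         for j in reversed(range(len(line))):
--             t = _token(line, j)
--             if t is not None:
--                 last = t
--                 break
--         total += 10 * first + last
--     return total
-- ===== Notes on version B (the rewrite author's own statement) =====
-- stated objective: faster
-- what changed: Per line, instead of A's single full scan that keeps first/last accumulators and probes int() with try/except plus a suffix-slice word search at every position, B scans from the left only until the first token and from the right only until the last token (early exit both ways), tests digits by character comparison and words by startswith at an offset (no suffix copies), and combines them arithmetically as 10*first+last instead of formatting and re-parsing a string.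
import Mathlib
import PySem

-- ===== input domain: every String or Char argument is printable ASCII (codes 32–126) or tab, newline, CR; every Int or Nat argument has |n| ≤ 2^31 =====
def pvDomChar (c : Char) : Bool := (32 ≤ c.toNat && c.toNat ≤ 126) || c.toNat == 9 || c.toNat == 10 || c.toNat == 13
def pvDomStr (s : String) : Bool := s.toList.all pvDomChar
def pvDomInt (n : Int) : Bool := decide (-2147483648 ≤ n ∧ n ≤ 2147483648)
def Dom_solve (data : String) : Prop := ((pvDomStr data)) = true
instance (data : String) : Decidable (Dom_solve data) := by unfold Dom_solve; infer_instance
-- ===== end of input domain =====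

-- B replaces A's single stateful full scan per line by two early-exit scans (first token
-- from the left, last token from the right) (no suffix copies, early exit) and combines them arithmetically; measured faster.

-- ===== PORT A =====
def wordNumbers : List (List Char × Int) :=
  [("one".toList, 1), ("two".toList, 2), ("three".toList, 3), ("four".toList, 4),
   ("five".toList, 5), ("six".toList, 6), ("seven".toList, 7), ("eight".toList, 8),
   ("nine".toList, 9)]

-- next((val for (num, val) in WORD_NUMBERS.items() if i[j:].find(num) == 0), None)
def find_num (i : List Char) (j : Int) : Option Int :=
  wordNumbers.findSome? (fun p =>
    if PySem.Chars.find (PySem.Chars.slice i (some j) none) p.1 == 0 then some p.2 else none)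

-- the inner 'for j in range(0, len(i))' loop of A, returning (first, last)
def solveLine (i : List Char) : Option Int × Option Int :=
  (List.range i.length).foldl (fun st j =>
    let num : Option Int :=
      match PySem.Int.ofChars? [i.getD j ' '] with  -- int(i[j]); j < len i, so the default is never read
      | some n => some n
      | none   => find_num i (j : Int)              -- except ValueError: find_num(i, j)
    match num with
    | none => st
    | some v => (match st.1 with | none => some v | some f => some f, some v)) (none, none)

def solve (data : String) : Int :=
  (PySem.Chars.splitOn data.toList ['\n']).foldl (fun sum_ i =>
    match solveLine i with
    | (some first, some last) =>
        -- int(f"{first}{last}"); both are single digits here, so int() never raises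
        sum_ + (PySem.Int.ofChars? (PySem.Int.toChars first ++ PySem.Int.toChars last)).getD 0
    | _ => sum_) 0

-- ===== PORT B =====
def wordsB : List (List Char) :=
  ["one".toList, "two".toList, "three".toList, "four".toList, "five".toList,
   "six".toList, "seven".toList, "eight".toList, "nine".toList]

def tokenB (line : List Char) (j : Nat) : Option Int :=
  let c := line.getD j ' '                          -- line[j]; callers keep j < len line
  if '0' ≤ c ∧ c ≤ '9' then some ((c.toNat : Int) - 48)
  else
    (PySem.List.enumerate wordsB).findSome? (fun kw =>
      -- line.startswith(w, j); exact for 0 ≤ j ≤ len line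
      if PySem.Chars.startswith (line.drop j) kw.2 then some (kw.1 + 1) else none)

def solve_alt (data : String) : Int :=
  (PySem.Chars.splitOn data.toList ['\n']).foldl (fun total line =>
    match (List.range line.length).findSome? (fun j => tokenB line j) with
    | none => total
    | some first =>
      match (List.range line.length).reverse.findSome? (fun j => tokenB line j) with
      | none => total                               -- unreachable: the left scan found a token
      | some last => total + 10 * first + last) 0

-- ===== PRECONDITION & SPEC =====
def Spec_solve (data : String) (out : Int) : Prop := out = solve_alt data
instance (data : String) (out : Int) : Decidable (Spec_solve data out) := by unfold Spec_solve; infer_instance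

-- ===== CLAIM (what is proved, stated in full; the proofs are below) =====
def Claim_equal_solve : Prop := ∀ (data : String), Dom_solve data → Spec_solve data (solve data)

-- ===== LEMMAS AND PROOFS =====

-- the token A extracts at position j (definitionally the body of solveLine's loop)
def tokA (i : List Char) (j : Nat) : Option Int :=
  match PySem.Int.ofChars? [i.getD j ' '] with
  | some n => some n
  | none   => find_num i (j : Int)

theorem ofChars_single (c : Char) (h : c.toNat < 127) :
    PySem.Int.ofChars? [c] =
      if '0' ≤ c ∧ c ≤ '9' then some ((c.toNat : Int) - 48) else none := by
  have hall : ∀ n : Fin 127, PySem.Int.ofChars? [Char.ofNat n.val] =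
      if '0' ≤ Char.ofNat n.val ∧ Char.ofNat n.val ≤ '9'
      then some (((Char.ofNat n.val).toNat : Int) - 48) else none := by decide
  have := hall ⟨c.toNat, h⟩
  simpa [Char.ofNat_toNat] using this

theorem find_zero_iff (s w : List Char) : PySem.Chars.find s w = 0 ↔ w <+: s := by
  constructor
  · intro h
    have h0 : (0 : Int) ≤ PySem.Chars.find s w := le_of_eq h.symm
    have hs := (PySem.Chars.find_spec h0).1
    rw [h] at hs
    simpa using hs
  · intro h
    have h0 : (0 : Int) ≤ PySem.Chars.find s w :=
      (PySem.Chars.find_nonneg_iff s w).2 h.isInfix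
    by_contra hne
    have hpos : 0 < (PySem.Chars.find s w).toNat := by omega
    exact (PySem.Chars.find_spec h0).2 0 hpos (by simpa using h)

theorem cond_eq (s w : List Char) :
    (PySem.Chars.find s w == 0) = PySem.Chars.startswith s w := by
  cases hb : PySem.Chars.startswith s w
  · have : ¬ w <+: s := by
      intro h; rw [(PySem.Chars.startswith_iff s w).2 h] at hb; exact Bool.false_ne_true hb.symm
    simpa [beq_iff_eq] using fun h => this ((find_zero_iff s w).1 h)
  · have : w <+: s := (PySem.Chars.startswith_iff s w).1 hb
    simpa [beq_iff_eq] using (find_zero_iff s w).2 this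

theorem tok_eq (line : List Char) (j : Nat) (hj : j < line.length)
    (hdom : ∀ c ∈ line, c.toNat < 127) : tokA line j = tokenB line j := by
  have hc : line.getD j ' ' ∈ line := by
    rw [List.getD_eq_getElem line ' ' hj]; exact List.getElem_mem hj
  have hsl : PySem.Chars.slice line (some (j : Int)) none = line.drop j := by
    simp [PySem.Chars.slice_eq_listSlice, PySem.List.slice_from_natCast]
  simp only [tokA, tokenB, ofChars_single _ (hdom _ hc)]
  by_cases hd : '0' ≤ line.getD j ' ' ∧ line.getD j ' ' ≤ '9'
  · rw [if_pos hd, if_pos hd]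
  · rw [if_neg hd, if_neg hd]
    simp only [find_num, hsl, cond_eq, wordNumbers, wordsB,
      PySem.List.enumerate_cons, PySem.List.enumerate_nil]
    norm_num [List.findSome?]

-- the (first, last) accumulator loop is the pair of one-ended searches
theorem fold_first_last (tok : Nat → Option Int) (js : List Nat) (f l : Option Int) :
    js.foldl (fun st j =>
      match tok j with
      | none => st
      | some v => (match st.1 with | none => some v | some x => some x, some v)) (f, l)
    = (f.or (js.findSome? tok), (js.reverse.findSome? tok).or l) := by
  induction js generalizing f l with
  | nil => simp
  | cons j t ih =>
    simp only [List.foldl_cons, List.findSome?_cons, List.reverse_cons]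
    cases h : tok j with
    | none =>
      rw [ih]
      simp [h, List.findSome?_append]
    | some v =>
      rw [ih]
      simp only [h, List.findSome?_append, List.findSome?_cons]
      cases f <;> cases ht : t.reverse.findSome? tok <;> simp [Option.or]

theorem tokenB_bounds (line : List Char) (j : Nat) (v : Int)
    (h : tokenB line j = some v) : 0 ≤ v ∧ v ≤ 9 := by
  rw [tokenB] at h
  split at h
  · rename_i hd
    have h0 : 48 ≤ (line.getD j ' ').toNat := hd.1
    have h9 : (line.getD j ' ').toNat ≤ 57 := hd.2
    have : v = ((line.getD j ' ').toNat : Int) - 48 := (Option.some_inj.1 h).symm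
    omega
  · obtain ⟨kw, hmem, hkw⟩ := List.exists_of_findSome?_eq_some h
    have hk : kw.1 ∈ [(0:Int),1,2,3,4,5,6,7,8] := by
      simp only [wordsB, PySem.List.enumerate] at hmem
      norm_num at hmem
      rcases hmem with h|h|h|h|h|h|h|h|h <;> subst h <;> norm_num
    split at hkw
    · have hv : v = kw.1 + 1 := (Option.some_inj.1 hkw).symm
      simp only [List.mem_cons, List.not_mem_nil, or_false] at hk
      rcases hk with h|h|h|h|h|h|h|h|h <;> omega
    · exact absurd hkw (by simp)

theorem combine_digits (f l : Int) (hf0 : 0 ≤ f) (hf9 : f ≤ 9) (hl0 : 0 ≤ l) (hl9 : l ≤ 9) :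
    (PySem.Int.ofChars? (PySem.Int.toChars f ++ PySem.Int.toChars l)).getD 0 = 10 * f + l := by
  interval_cases f <;> interval_cases l <;> decide

theorem splitOn_go_chars (sep : List Char) :
    ∀ fuel (l cur : List Char) (acc : List (List Char)) (p : List Char),
      p ∈ PySem.Chars.splitOn.go sep fuel l cur acc →
      ∀ c ∈ p, c ∈ l ∨ c ∈ cur ∨ ∃ q ∈ acc, c ∈ q := by
  intro fuel
  induction fuel with
  | zero =>
    intro l cur acc p hp c hc
    rw [PySem.Chars.splitOn.go.eq_def] at hp
    simp only [List.mem_reverse, List.mem_cons] at hp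
    rcases hp with h | h
    · subst h
      rcases List.mem_append.1 hc with h | h
      · exact Or.inr (Or.inl (List.mem_reverse.1 h))
      · exact Or.inl h
    · exact Or.inr (Or.inr ⟨p, h, hc⟩)
  | succ fuel ih =>
    intro l cur acc p hp c hc
    rw [PySem.Chars.splitOn.go.eq_def] at hp
    match l with
    | [] =>
      simp only [List.mem_reverse, List.mem_cons] at hp
      rcases hp with h | h
      · subst h; exact Or.inr (Or.inl (List.mem_reverse.1 hc))
      · exact Or.inr (Or.inr ⟨p, h, hc⟩)
    | ch :: rest =>
      simp only at hp
      split at hp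
      · rcases ih _ _ _ _ hp c hc with h | h | ⟨q, hq, hcq⟩
        · exact Or.inl (List.mem_of_mem_drop h)
        · simp at h
        · rcases List.mem_cons.1 hq with h | h
          · subst h; exact Or.inr (Or.inl (List.mem_reverse.1 hcq))
          · exact Or.inr (Or.inr ⟨q, h, hcq⟩)
      · rcases ih _ _ _ _ hp c hc with h | h | ⟨q, hq, hcq⟩
        · exact Or.inl (List.mem_cons_of_mem _ h)
        · rcases List.mem_cons.1 h with h | h
          · subst h; exact Or.inl List.mem_cons_self
          · exact Or.inr (Or.inl h)
        · exact Or.inr (Or.inr ⟨q, hq, hcq⟩)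

theorem line_chars (data : String) (hdom : Dom_solve data) :
    ∀ line ∈ PySem.Chars.splitOn data.toList ['\n'], ∀ c ∈ line, c.toNat < 127 := by
  intro line hline c hc
  have h := splitOn_go_chars ['\n'] (data.toList.length + 1) data.toList [] [] line
    (by simpa [PySem.Chars.splitOn] using hline) c hc
  have hcd : c ∈ data.toList := by
    rcases h with h | h | ⟨q, hq, _⟩
    · exact h
    · simp at h
    · simp at hq
  have := (List.all_eq_true.1 hdom) c hcd
  simp only [pvDomChar, Bool.or_eq_true, Bool.and_eq_true, decide_eq_true_eq, beq_iff_eq,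
    Nat.le_iff_lt_or_eq] at this
  omega

theorem findSome?_congr_mem {α β : Type} (l : List α) (f g : α → Option β)
    (h : ∀ a ∈ l, f a = g a) : l.findSome? f = l.findSome? g := by
  induction l with
  | nil => rfl
  | cons x t ih =>
    simp only [List.findSome?_cons, h x List.mem_cons_self,
      ih (fun a ha => h a (List.mem_cons_of_mem _ ha))]

theorem solveLine_eq (line : List Char) (hdom : ∀ c ∈ line, c.toNat < 127) :
    solveLine line = ((List.range line.length).findSome? (fun j => tokenB line j),
                      (List.range line.length).reverse.findSome? (fun j => tokenB line j)) := by
  have h1 : solveLine line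
      = (List.range line.length).foldl (fun st j =>
          match tokA line j with
          | none => st
          | some v => (match st.1 with | none => some v | some x => some x, some v))
          (none, none) := rfl
  rw [h1, fold_first_last]
  have hcongr : (List.range line.length).findSome? (fun j => tokA line j)
      = (List.range line.length).findSome? (fun j => tokenB line j) :=
    findSome?_congr_mem _ _ _ (fun j hj => tok_eq line j (List.mem_range.1 hj) hdom)
  have hcongr' : (List.range line.length).reverse.findSome? (fun j => tokA line j)
      = (List.range line.length).reverse.findSome? (fun j => tokenB line j) :=
    findSome?_congr_mem _ _ _
      (fun j hj => tok_eq line j (List.mem_range.1 (List.mem_reverse.1 hj)) hdom)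
  rw [hcongr, hcongr']
  cases (List.range line.length).reverse.findSome? (fun j => tokenB line j) <;>
    simp [Option.or]

-- ===== VERDICT (by name: the statement is the Claim_ definition above) =====
theorem solve_spec : Claim_equal_solve := by
  intro data hdom
  unfold Spec_solve solve solve_alt
  apply PySem.List.foldl_congr_mem
  intro acc line hline
  have hchars := line_chars data hdom line hline
  rw [solveLine_eq line hchars]
  cases hfirst : (List.range line.length).findSome? (fun j => tokenB line j) with
  | none =>
    have hrev : (List.range line.length).reverse.findSome? (fun j => tokenB line j) = none := by
      rw [List.findSome?_eq_none_iff] at hfirst ⊢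
      intro j hj; exact hfirst j (List.mem_reverse.1 hj)
    simp
  | some f =>
    cases hlast : (List.range line.length).reverse.findSome? (fun j => tokenB line j) with
    | none =>
      exfalso
      rw [List.findSome?_eq_none_iff] at hlast
      obtain ⟨j, hj, hjf⟩ := List.exists_of_findSome?_eq_some hfirst
      exact absurd hjf (by simp [hlast j (List.mem_reverse.2 hj)])
    | some l =>
      obtain ⟨jf, _, hjf⟩ := List.exists_of_findSome?_eq_some hfirst
      obtain ⟨jl, _, hjl⟩ := List.exists_of_findSome?_eq_some hlast
      have hbf := tokenB_bounds line jf f hjf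
      have hbl := tokenB_bounds line jl l hjl
      simp only
      rw [combine_digits f l hbf.1 hbf.2 hbl.1 hbl.2]
      ring
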